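-- pv_equiv track=rewrite | github.com/navaneeswar854/zooom | server/media_relay.py | _average_audio_samples
-- ===== SOURCE A (Python) =====
-- from typing import Dict, List, Optional, Tuple
--
-- def _average_audio_samples(audio_samples_list: List[Tuple[int, ...]]) -> List[int]:
--     """
--     Average audio samples from multiple sources.
--
--     Args:
--         audio_samples_list: List of audio sample tuples from different clients
--
--     Returns:
--         List of mixed audio samples
--     """
--     if not audio_samples_list:
--         return []
--
--     # Find the minimum length to avoid index errors
--     min_length = min(len(samples) for samples in audio_samples_list)
--
--     mixed_samples = []
--     for i in range(min_length):
--         # Average the samples at position i from all clients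
--         sample_sum = sum(samples[i] for samples in audio_samples_list)
--         avg_sample = sample_sum // len(audio_samples_list)
--
--         # Clamp to 16-bit signed integer range
--         avg_sample = max(-32768, min(32767, avg_sample))
--         mixed_samples.append(avg_sample)
--
--     return mixed_samples
-- ===== SOURCE B (Python) =====
-- from typing import List, Tuple
--
--
-- def _average_audio_samples(audio_samples_list: List[Tuple[int, ...]]) -> List[int]:
--     if not audio_samples_list:
--         return []
--     min_length = min(len(samples) for samples in audio_samples_list)
--     n = len(audio_samples_list)
--     # client-major pass over a persistent running-sum accumulator
--     sums = [0] * min_length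
--     for samples in audio_samples_list:
--         sums = [a + b for a, b in zip(sums, samples)]
--     return [max(-32768, min(32767, s // n)) for s in sums]
-- ===== Notes on version B (the rewrite author's own statement) =====
-- stated objective: alternative
-- what changed: Replaces A's column-by-column scan (re-reading every client per output sample) with a single client-major pass that accumulates a persistent running-sum array, then maps the sums through the clamp-and-divide step.
import Mathlib
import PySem

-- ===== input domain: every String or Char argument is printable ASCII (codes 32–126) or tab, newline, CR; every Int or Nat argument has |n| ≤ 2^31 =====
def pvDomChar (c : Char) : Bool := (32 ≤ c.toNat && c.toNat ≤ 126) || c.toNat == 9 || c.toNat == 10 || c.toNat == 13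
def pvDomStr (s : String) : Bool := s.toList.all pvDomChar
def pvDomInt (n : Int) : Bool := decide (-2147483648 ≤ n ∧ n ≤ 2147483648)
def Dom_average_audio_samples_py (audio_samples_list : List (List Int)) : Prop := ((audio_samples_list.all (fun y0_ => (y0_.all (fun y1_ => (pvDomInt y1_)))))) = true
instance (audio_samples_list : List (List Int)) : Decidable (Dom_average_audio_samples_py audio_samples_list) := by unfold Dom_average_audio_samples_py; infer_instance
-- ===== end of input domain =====

-- B replaces A's column-by-column scan with one client-major pass over a persistent
-- running-sum accumulator (objective: alternative decomposition, same cost).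

-- ===== PORT A =====
-- column-by-column: for each i < min_length, re-scan all clients to sum column i
def average_audio_samples_py (audio_samples_list : List (List Int)) : List Int :=
  if audio_samples_list = [] then []
  else
    let min_length := ((audio_samples_list.map List.length).min?).getD 0
    (List.range min_length).map (fun i =>
      let sample_sum := audio_samples_list.foldl (fun acc samples => acc + samples.getD i 0) 0
      let avg_sample := PySem.Int.floordiv sample_sum (audio_samples_list.length : Int)
      max (-32768) (min 32767 avg_sample))

-- ===== PORT B =====
-- client-major: fold each client's samples into a running-sum array, then clamp/divide
def average_audio_samples_py_alt (audio_samples_list : List (List Int)) : List Int :=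
  if audio_samples_list = [] then []
  else
    let min_length := ((audio_samples_list.map List.length).min?).getD 0
    let n : Int := audio_samples_list.length
    let sums := audio_samples_list.foldl
      (fun sums samples => List.zipWith (· + ·) sums samples)
      (List.replicate min_length 0)
    sums.map (fun s => max (-32768) (min 32767 (PySem.Int.floordiv s n)))

-- ===== PRECONDITION & SPEC =====
def Spec_average_audio_samples_py (audio_samples_list : List (List Int)) (out : List Int) : Prop := out = average_audio_samples_py_alt audio_samples_list
instance (audio_samples_list : List (List Int)) (out : List Int) : Decidable (Spec_average_audio_samples_py audio_samples_list out) := by unfold Spec_average_audio_samples_py; infer_instance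

-- ===== CLAIM (what is proved, stated in full; the proofs are below) =====
def Claim_equal_average_audio_samples_py : Prop := ∀ (audio_samples_list : List (List Int)), Dom_average_audio_samples_py audio_samples_list → Spec_average_audio_samples_py audio_samples_list (average_audio_samples_py audio_samples_list)

-- ===== LEMMAS AND PROOFS =====

-- the zipWith running-sum fold equals, entrywise, the column-sum fold
theorem foldZip (xss : List (List Int)) (sums : List Int)
    (h : ∀ ss ∈ xss, sums.length ≤ ss.length) :
    xss.foldl (fun a b => List.zipWith (· + ·) a b) sums =
      (List.range sums.length).map
        (fun i => xss.foldl (fun acc ss => acc + ss.getD i 0) (sums.getD i 0)) := by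
  induction xss generalizing sums with
  | nil =>
      simp only [List.foldl_nil]
      apply List.ext_getElem
      · simp
      · intro i h1 h2
        simp [List.getD_eq_getElem?_getD, h1]
  | cons ss xss ih =>
      have hlen : ss.length ⊓ sums.length = sums.length := by
        have := h ss (by simp)
        omega
      have hz : (List.zipWith (· + ·) sums ss).length = sums.length := by
        simp [List.length_zipWith]; omega
      simp only [List.foldl_cons]
      rw [ih _ (by intro t ht; rw [hz]; exact h t (by simp [ht]))]
      rw [hz]
      apply List.map_congr_left
      intro i hi
      have hi' : i < sums.length := by simpa using hi
      have hi'' : i < ss.length := lt_of_lt_of_le hi' (h ss (by simp))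
      congr 1
      rw [List.getD_eq_getElem _ _ (by omega), List.getD_eq_getElem _ _ hi',
        List.getD_eq_getElem _ _ hi'', List.getElem_zipWith]

theorem min_le_mem (xss : List (List Int)) (ss : List Int) (hss : ss ∈ xss) :
    ((xss.map List.length).min?).getD 0 ≤ ss.length := by
  have hmem : ss.length ∈ xss.map List.length := List.mem_map_of_mem hss
  cases hq : (xss.map List.length).min? with
  | none => rw [List.min?_eq_none_iff] at hq; simp [hq] at hmem
  | some m =>
      have := (List.min?_eq_some_iff.mp hq).2 ss.length hmem
      simpa using this

-- ===== VERDICT (by name: the statement is the Claim_ definition above) =====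
theorem average_audio_samples_py_spec : Claim_equal_average_audio_samples_py := by
  intro xss _
  unfold Spec_average_audio_samples_py average_audio_samples_py average_audio_samples_py_alt
  by_cases hnil : xss = []
  · simp [hnil]
  · simp only [if_neg hnil]
    rw [foldZip, List.map_map]
    · simp [Function.comp]
    · intro ss hss
      rw [List.length_replicate]
      exact min_le_mem xss ss hss
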